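-- pv_equiv track=rewrite | github.com/GeorgiyII/excell_lib | service_app/domain/data_master.py | get_merge_cells
-- ===== SOURCE A (Python) =====
-- def get_merge_cells(row_data, row_number):
--     merge_cells = []
--     start_cell = None
--     finish_cell = None
--     for index, data in enumerate(row_data):
--         if index > 3:
--             if data and not start_cell:
--                 start_cell = (row_number, index + 1)
--             elif data and start_cell and not finish_cell:
--                 finish_cell = (row_number, index)
--             if start_cell and finish_cell:
--                 merge_cells.append((start_cell, finish_cell))
--                 start_cell = (row_number, index + 1)
--                 finish_cell = None
--     if start_cell and not finish_cell:
--         finish_cell = (row_number, len(row_data))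
--         merge_cells.append((start_cell, finish_cell))
--     return merge_cells
-- ===== SOURCE B (Python) =====
-- def get_merge_cells(row_data, row_number):
--     positions = [i for i, d in enumerate(row_data) if i > 3 and d]
--     ends = positions[1:] + [len(row_data)]
--     return [((row_number, p + 1), (row_number, e)) for p, e in zip(positions, ends)]
-- ===== Notes on version B (the rewrite author's own statement) =====
-- stated objective: simpler
-- what changed: Replaced A's stateful start/finish scanner (with append-and-reset sentinel logic) by collecting the truthy positions past index 3 once and zipping each with its successor (or len(row_data)) to form the ranges.
import Mathlib
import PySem

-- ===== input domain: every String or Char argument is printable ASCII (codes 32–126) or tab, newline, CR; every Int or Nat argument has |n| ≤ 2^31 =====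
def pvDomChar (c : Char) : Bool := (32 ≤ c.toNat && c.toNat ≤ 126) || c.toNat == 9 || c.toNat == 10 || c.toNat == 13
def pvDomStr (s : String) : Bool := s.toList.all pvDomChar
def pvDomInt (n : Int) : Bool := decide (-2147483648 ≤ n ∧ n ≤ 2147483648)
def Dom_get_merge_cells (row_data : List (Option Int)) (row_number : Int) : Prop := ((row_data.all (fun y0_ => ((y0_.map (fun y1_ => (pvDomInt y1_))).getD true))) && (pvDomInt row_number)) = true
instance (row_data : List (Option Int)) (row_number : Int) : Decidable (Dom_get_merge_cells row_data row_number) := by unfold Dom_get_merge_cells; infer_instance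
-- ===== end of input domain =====

-- B replaces A's stateful start/finish scanner by collecting the truthy positions once and
-- pairing each with its successor (or len(row_data)); objective: simpler. Same return value.

-- Python truthiness of an Optional[int] cell: None and 0 are falsy.
def pyTruthy (o : Option Int) : Bool :=
  match o with
  | none => false
  | some n => decide (n ≠ 0)

-- ===== PORT A =====
-- one iteration of A's for-loop; state = (merge_cells, start_cell, finish_cell).
-- (start_cell/finish_cell are tuples when set, so Python's 'not start_cell' is 'isNone')
def stepA (row_number : Int)
    (s : List ((Int × Int) × (Int × Int)) × Option (Int × Int) × Option (Int × Int))
    (p : Int × Option Int) :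
    List ((Int × Int) × (Int × Int)) × Option (Int × Int) × Option (Int × Int) :=
  let (mc, start, finish) := s
  if p.1 > 3 then
    let (start, finish) :=
      if pyTruthy p.2 && start.isNone then (some (row_number, p.1 + 1), finish)
      else if pyTruthy p.2 && start.isSome && finish.isNone then (start, some (row_number, p.1))
      else (start, finish)
    match start, finish with
    | some sc, some fc => (mc ++ [(sc, fc)], some (row_number, p.1 + 1), none)
    | _, _ => (mc, start, finish)
  else (mc, start, finish)

def get_merge_cells (row_data : List (Option Int)) (row_number : Int) : List ((Int × Int) × (Int × Int)) :=
  let st := (PySem.List.enumerate row_data).foldl (stepA row_number) ([], none, none)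
  match st.2.1, st.2.2 with
  | some sc, none => st.1 ++ [(sc, (row_number, (row_data.length : Int)))]
  | _, _ => st.1

-- ===== PORT B =====
def get_merge_cells_alt (row_data : List (Option Int)) (row_number : Int) : List ((Int × Int) × (Int × Int)) :=
  let positions := ((PySem.List.enumerate row_data).filter (fun p => decide (p.1 > 3) && pyTruthy p.2)).map (fun p => p.1)
  let ends := positions.drop 1 ++ [(row_data.length : Int)]
  (positions.zip ends).map (fun pe => ((row_number, pe.1 + 1), (row_number, pe.2)))

-- ===== PRECONDITION & SPEC =====
def Spec_get_merge_cells (row_data : List (Option Int)) (row_number : Int) (out : List ((Int × Int) × (Int × Int))) : Prop := out = get_merge_cells_alt row_data row_number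
instance (row_data : List (Option Int)) (row_number : Int) (out : List ((Int × Int) × (Int × Int))) : Decidable (Spec_get_merge_cells row_data row_number out) := by unfold Spec_get_merge_cells; infer_instance

-- ===== CLAIM (what is proved, stated in full; the proofs are below) =====
def Claim_equal_get_merge_cells : Prop := ∀ (row_data : List (Option Int)) (row_number : Int), Dom_get_merge_cells row_data row_number → Spec_get_merge_cells row_data row_number (get_merge_cells row_data row_number)

-- ===== LEMMAS AND PROOFS =====

-- the truthy positions (index > 3) of l, scanned with absolute start index s
def posF (l : List (Option Int)) (s : Int) : List Int :=
  ((PySem.List.enumerate l s).filter (fun p => decide (p.1 > 3) && pyTruthy p.2)).map (fun p => p.1)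

-- consecutive pairs produced while the scanner is running
def pairsC (r : Int) (p : Int) : List Int → List ((Int × Int) × (Int × Int))
  | [] => []
  | q :: qs => ((r, p + 1), (r, q)) :: pairsC r q qs

lemma posF_nil (s : Int) : posF [] s = [] := by
  simp [posF, PySem.List.enumerate_nil]

lemma posF_cons (d : Option Int) (l : List (Option Int)) (s : Int) :
    posF (d :: l) s =
      if decide (s > 3) && pyTruthy d then s :: posF l (s + 1) else posF l (s + 1) := by
  simp only [posF, PySem.List.enumerate_cons, List.filter_cons]
  split_ifs with h <;> simp

-- running the loop from a started state (start = (r, p+1), finish = None)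
lemma loop_started (r : Int) (l : List (Option Int)) :
    ∀ (s : Int) (mc : List ((Int × Int) × (Int × Int))) (p : Int),
      (PySem.List.enumerate l s).foldl (stepA r) (mc, some (r, p + 1), none) =
        (mc ++ pairsC r p (posF l s), some (r, (posF l s).getLastD p + 1), none) := by
  induction l with
  | nil => intro s mc p; simp [PySem.List.enumerate_nil, posF_nil, pairsC]
  | cons d l ih =>
    intro s mc p
    rw [PySem.List.enumerate_cons, List.foldl_cons, posF_cons]
    by_cases h3 : s > 3
    · cases ht : pyTruthy d
      · have hs : stepA r (mc, some (r, p + 1), none) (s, d) = (mc, some (r, p + 1), none) := by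
          simp [stepA, h3, ht]
        rw [hs, ih]
        simp
      · have hs : stepA r (mc, some (r, p + 1), none) (s, d) =
            (mc ++ [((r, p + 1), (r, s))], some (r, s + 1), none) := by
          simp [stepA, h3, ht]
        rw [hs, ih]
        simp only [h3, decide_true, Bool.and_self, if_true, pairsC, List.getLastD_cons,
          List.append_assoc, List.singleton_append]
    · have hs : stepA r (mc, some (r, p + 1), none) (s, d) = (mc, some (r, p + 1), none) := by
        simp [stepA, h3]
      rw [hs, ih]
      simp [h3]

-- running the loop from the initial (not yet started) state
lemma loop_unstarted (r : Int) (l : List (Option Int)) :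
    ∀ (s : Int) (mc : List ((Int × Int) × (Int × Int))),
      (PySem.List.enumerate l s).foldl (stepA r) (mc, none, none) =
        match posF l s with
        | [] => (mc, none, none)
        | p :: ps => (mc ++ pairsC r p ps, some (r, ps.getLastD p + 1), none) := by
  induction l with
  | nil => intro s mc; simp [PySem.List.enumerate_nil, posF_nil]
  | cons d l ih =>
    intro s mc
    rw [PySem.List.enumerate_cons, List.foldl_cons, posF_cons]
    by_cases h3 : s > 3
    · cases ht : pyTruthy d
      · have hs : stepA r (mc, none, none) (s, d) = (mc, none, none) := by
          simp [stepA, h3, ht]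
        rw [hs, ih]
        simp
      · have hs : stepA r (mc, none, none) (s, d) = (mc, some (r, s + 1), none) := by
          simp [stepA, h3, ht]
        rw [hs, loop_started]
        simp [h3]
    · have hs : stepA r (mc, none, none) (s, d) = (mc, none, none) := by
        simp [stepA, h3]
      rw [hs, ih]
      simp [h3]

-- B's zip-with-successors pairing, as a function of the position list
def zc (r n : Int) (ps : List Int) : List ((Int × Int) × (Int × Int)) :=
  (ps.zip (ps.drop 1 ++ [n])).map (fun pe => ((r, pe.1 + 1), (r, pe.2)))

lemma zc_eq (r n : Int) : ∀ (ps : List Int) (p : Int),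
    zc r n (p :: ps) = pairsC r p ps ++ [((r, ps.getLastD p + 1), (r, n))] := by
  intro ps
  induction ps with
  | nil => intro p; simp [zc, pairsC]
  | cons q qs ih =>
    intro p
    simp only [pairsC, List.getLastD_cons, List.cons_append]
    rw [← ih q]
    simp [zc]

-- ===== VERDICT (by name: the statement is the Claim_ definition above) =====
theorem get_merge_cells_spec : Claim_equal_get_merge_cells := by
  intro row_data row_number _
  show get_merge_cells row_data row_number = get_merge_cells_alt row_data row_number
  have hB : get_merge_cells_alt row_data row_number =
      zc row_number (row_data.length : Int) (posF row_data 0) := rfl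
  rw [hB]
  unfold get_merge_cells
  rw [loop_unstarted]
  cases h : posF row_data 0 with
  | nil => simp [zc]
  | cons p ps => rw [zc_eq]; simp
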